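-- pv_equiv track=rewrite | github.com/nicholasburka/q-analysis | categorize-qs-streamlit.py | combine_json
-- ===== SOURCE A (Python) =====
-- def combine_json(json1, json2, constant):
--     combined_json = {'categories': {}}
--
--     for category, subcategories in json2['categories'].items():
--         if category not in combined_json['categories']:
--             combined_json['categories'][category] = {}
--
--         for subtype, questions in subcategories.items():
--             if subtype not in combined_json['categories'][category]:
--                 combined_json['categories'][category][subtype] = [{'question_ids': []}]
--
--             # Append modified question IDs
--             modified_ids = [qid + constant for qid in questions[0]['question_ids']]
--             combined_json['categories'][category][subtype][0]['question_ids'].extend(modified_ids)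
--
--     # Now, also add the existing categories from json1
--     for category, subcategories in json1['categories'].items():
--         if category not in combined_json['categories']:
--             combined_json['categories'][category] = subcategories
--         else:
--             for subtype, questions in subcategories.items():
--                 if subtype not in combined_json['categories'][category]:
--                     combined_json['categories'][category][subtype] = questions
--                 else:
--                     combined_json['categories'][category][subtype][0]['question_ids'].extend(questions[0]['question_ids'])
--
--     return combined_json
-- ===== SOURCE B (Python) =====
-- def combine_json(json1, json2, constant):
--     c1 = json1['categories']
--     c2 = json2['categories']
--     categories = {}
--     for category in list(c2) + [c for c in c1 if c not in c2]:
--         if category not in c2: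
--             # category only in json1: keep its subcategories structure intact
--             categories[category] = c1[category]
--             continue
--         s2 = c2[category]
--         s1 = c1.get(category, {})
--         sub = {}
--         for subtype in list(s2) + [s for s in s1 if s not in s2]:
--             if subtype not in s2:
--                 # subtype only in json1: keep its questions list intact
--                 sub[subtype] = s1[subtype]
--             else:
--                 ids = [qid + constant for qid in s2[subtype][0]['question_ids']]
--                 if subtype in s1:
--                     ids = ids + s1[subtype][0]['question_ids']
--                 sub[subtype] = [{'question_ids': ids}]
--         categories[category] = sub
--     return {'categories': categories}
-- ===== Notes on version B (the rewrite author's own statement) =====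
-- stated objective: alternative
-- what changed: B builds the result in a single key-union pass (json2 categories/subtypes first, then json1-only ones), computing each merged entry directly from both inputs, instead of A's two sequential passes where the json1 pass mutates and extends the dict the json2 pass built.
import Mathlib
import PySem

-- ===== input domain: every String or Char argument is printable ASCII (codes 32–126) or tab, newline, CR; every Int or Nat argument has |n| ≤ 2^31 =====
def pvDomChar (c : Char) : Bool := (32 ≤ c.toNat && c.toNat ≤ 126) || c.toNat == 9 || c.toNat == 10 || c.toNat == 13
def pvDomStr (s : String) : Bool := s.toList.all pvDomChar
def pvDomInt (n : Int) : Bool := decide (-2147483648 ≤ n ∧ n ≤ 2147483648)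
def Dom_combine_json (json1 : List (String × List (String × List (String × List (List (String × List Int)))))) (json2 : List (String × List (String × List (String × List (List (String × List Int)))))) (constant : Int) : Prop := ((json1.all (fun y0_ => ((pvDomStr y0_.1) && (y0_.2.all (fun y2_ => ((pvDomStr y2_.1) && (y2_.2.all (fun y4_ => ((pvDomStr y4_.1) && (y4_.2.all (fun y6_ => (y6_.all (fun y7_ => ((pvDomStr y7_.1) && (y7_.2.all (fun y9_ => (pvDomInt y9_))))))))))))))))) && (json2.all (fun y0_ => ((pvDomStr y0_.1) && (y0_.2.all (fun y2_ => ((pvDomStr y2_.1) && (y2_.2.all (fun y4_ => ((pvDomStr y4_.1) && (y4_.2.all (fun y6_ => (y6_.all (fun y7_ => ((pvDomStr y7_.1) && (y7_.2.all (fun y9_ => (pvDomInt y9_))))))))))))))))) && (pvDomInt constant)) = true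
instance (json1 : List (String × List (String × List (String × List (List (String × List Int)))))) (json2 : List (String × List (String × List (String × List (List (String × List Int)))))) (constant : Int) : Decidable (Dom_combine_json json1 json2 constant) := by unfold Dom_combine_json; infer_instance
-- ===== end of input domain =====

-- B merges the two nested category dicts in ONE key-union pass (json2 keys, then json1-only keys),
-- computing each entry directly, instead of A's two sequential mutating passes; objective: alternative.

-- shared helper types (dicts are association lists with unique keys)
abbrev pvQ := List (String × List Int)       -- one question dict
abbrev pvQL := List pvQ                      -- list of question dicts
abbrev pvSubs := List (String × pvQL)        -- subtype dict
abbrev pvCats := List (String × pvSubs)      -- category dict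

-- shared helpers (Python dict membership / lookup / questions[0]['question_ids'])
def pvKeyMem {V : Type} (d : List (String × V)) (k : String) : Bool := (d.map Prod.fst).contains k
def pvRawIds (qs : pvQL) : List Int := (List.lookup "question_ids" (qs.headD [])).getD []

-- ===== PORT A =====
-- in-place update of the (first) entry with key k, as Python's d[k] mutation
def pvModK {V : Type} (d : List (String × V)) (k : String) (f : V → V) : List (String × V) :=
  match d with
  | [] => []
  | (k', v) :: t => if k' == k then (k', f v) :: t else (k', v) :: pvModK t k f

-- ql[0]['question_ids'].extend(ids)  (no-op where Python would raise; Pre_ excludes those)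
def pvExtend (ql : pvQL) (ids : List Int) : pvQL :=
  match ql with
  | [] => []
  | q :: t => pvModK q "question_ids" (fun l => l ++ ids) :: t

def combine_json (json1 : List (String × List (String × List (String × List (List (String × List Int)))))) (json2 : List (String × List (String × List (String × List (List (String × List Int)))))) (constant : Int) : List (String × List (String × List (String × List (List (String × List Int))))) :=
  let c2 := (List.lookup "categories" json2).getD []
  let c1 := (List.lookup "categories" json1).getD []
  -- pass over json2: create fresh entries and extend offset ids
  let co := c2.foldl (fun co p =>
    let co := if pvKeyMem co p.1 then co else co ++ [(p.1, ([] : pvSubs))]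
    p.2.foldl (fun co q =>
      pvModK co p.1 (fun cd =>
        let cd := if pvKeyMem cd q.1 then cd else cd ++ [(q.1, [[("question_ids", ([] : List Int))]])]
        pvModK cd q.1 (fun ql => pvExtend ql ((pvRawIds q.2).map (fun qid => qid + constant))))) co) []
  -- pass over json1: wholesale copies or extends into what the json2 pass built
  let co := c1.foldl (fun co p =>
    if ! pvKeyMem co p.1 then co ++ [(p.1, p.2)]
    else p.2.foldl (fun co q =>
      pvModK co p.1 (fun cd =>
        if ! pvKeyMem cd q.1 then cd ++ [(q.1, q.2)]
        else pvModK cd q.1 (fun ql => pvExtend ql (pvRawIds q.2)))) co) co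
  [("categories", co)]

-- ===== PORT B =====
def pvMergeIds (s1 : pvSubs) (st : String) (ids : List Int) : List Int :=
  match List.lookup st s1 with
  | some qs => ids ++ pvRawIds qs
  | none => ids

def pvSubsB (s1 s2 : pvSubs) (constant : Int) : pvSubs :=
  s2.map (fun q => (q.1, [[("question_ids", pvMergeIds s1 q.1 ((pvRawIds q.2).map (fun qid => qid + constant)))]]))
  ++ s1.filter (fun q => ! pvKeyMem s2 q.1)

def combine_json_alt (json1 : List (String × List (String × List (String × List (List (String × List Int)))))) (json2 : List (String × List (String × List (String × List (List (String × List Int)))))) (constant : Int) : List (String × List (String × List (String × List (List (String × List Int))))) :=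
  let c1 := (List.lookup "categories" json1).getD []
  let c2 := (List.lookup "categories" json2).getD []
  [("categories",
    c2.map (fun p => (p.1, pvSubsB ((List.lookup p.1 c1).getD []) p.2 constant))
    ++ c1.filter (fun p => ! pvKeyMem c2 p.1))]

-- ===== PRECONDITION & SPEC =====
-- questions[0]['question_ids'] exists (where Python reads it; otherwise IndexError/KeyError)
def pvQok (qs : pvQL) : Prop := qs ≠ [] ∧ (List.lookup "question_ids" (qs.headD [])).isSome = true

-- Pre_ = exactly where Python A returns: both inputs carry a 'categories' key (else KeyError);
-- every question list A indexes has a first element with a 'question_ids' key (else IndexError/KeyError);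
-- and each dict level has unique keys — an association list with duplicate keys represents no Python dict.
def Pre_combine_json (json1 : List (String × List (String × List (String × List (List (String × List Int)))))) (json2 : List (String × List (String × List (String × List (List (String × List Int)))))) (constant : Int) : Prop :=
  (List.lookup "categories" json1).isSome = true ∧
  (List.lookup "categories" json2).isSome = true ∧
  (((List.lookup "categories" json2).getD []).map Prod.fst).Nodup ∧
  (((List.lookup "categories" json1).getD []).map Prod.fst).Nodup ∧
  (∀ p ∈ (List.lookup "categories" json2).getD ([] : pvCats),
     (p.2.map Prod.fst).Nodup ∧ ∀ q ∈ p.2, pvQok q.2) ∧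
  (∀ p ∈ (List.lookup "categories" json1).getD ([] : pvCats),
     ∀ e ∈ (List.lookup "categories" json2).getD ([] : pvCats), e.1 = p.1 →
      (p.2.map Prod.fst).Nodup ∧ ∀ q ∈ p.2, ∀ r ∈ e.2, r.1 = q.1 → pvQok q.2)
instance (json1 : List (String × List (String × List (String × List (List (String × List Int)))))) (json2 : List (String × List (String × List (String × List (List (String × List Int)))))) (constant : Int) : Decidable (Pre_combine_json json1 json2 constant) := by unfold Pre_combine_json pvQok; infer_instance

def pvWitness_combine_json : (List (String × List (String × List (String × List (List (String × List Int)))))) × (List (String × List (String × List (String × List (List (String × List Int)))))) × Int :=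
  ([("categories", [("a", [("x", [[("question_ids", [1, 2])]])]), ("b", [("y", [[("question_ids", [3])]])])])],
   [("categories", [("a", [("x", [[("question_ids", [4])]]), ("z", [[("question_ids", [])]])])])],
   10)

def Spec_combine_json (json1 : List (String × List (String × List (String × List (List (String × List Int)))))) (json2 : List (String × List (String × List (String × List (List (String × List Int)))))) (constant : Int) (out : List (String × List (String × List (String × List (List (String × List Int)))))) : Prop := out = combine_json_alt json1 json2 constant
instance (json1 : List (String × List (String × List (String × List (List (String × List Int)))))) (json2 : List (String × List (String × List (String × List (List (String × List Int)))))) (constant : Int) (out : List (String × List (String × List (String × List (List (String × List Int)))))) : Decidable (Spec_combine_json json1 json2 constant out) := by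
  unfold Spec_combine_json
  letI d0 : DecidableEq (List (String × List Int)) := inferInstance
  letI d1 : DecidableEq (List (List (String × List Int))) := inferInstance
  letI d2 : DecidableEq (List (String × List (List (String × List Int)))) := inferInstance
  letI d3 : DecidableEq (List (String × List (String × List (List (String × List Int))))) := inferInstance
  infer_instance

-- ===== CLAIM (what is proved, stated in full; the proofs are below) =====
def Claim_equal_combine_json : Prop := ∀ (json1 : List (String × List (String × List (String × List (List (String × List Int)))))) (json2 : List (String × List (String × List (String × List (List (String × List Int)))))) (constant : Int), Dom_combine_json json1 json2 constant → Pre_combine_json json1 json2 constant → Spec_combine_json json1 json2 constant (combine_json json1 json2 constant)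

-- ===== LEMMAS AND PROOFS =====

theorem pvKeyMem_iff {V : Type} (d : List (String × V)) (k : String) :
    pvKeyMem d k = true ↔ k ∈ d.map Prod.fst := by
  simp [pvKeyMem]

theorem pvModK_map_fst {V : Type} (d : List (String × V)) (k : String) (f : V → V) :
    (pvModK d k f).map Prod.fst = d.map Prod.fst := by
  induction d with
  | nil => rfl
  | cons h t ih => obtain ⟨k', v⟩ := h; by_cases hk : (k' == k) <;> simp [pvModK, hk, ih]

theorem pvModK_append_fresh {V : Type} (d : List (String × V)) (k : String) (v : V) (f : V → V)
    (h : k ∉ d.map Prod.fst) : pvModK (d ++ [(k, v)]) k f = d ++ [(k, f v)] := by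
  induction d with
  | nil => simp [pvModK]
  | cons hd t ih =>
    obtain ⟨k', v'⟩ := hd
    simp only [List.map_cons, List.mem_cons, not_or] at h
    have hb : (k' == k) = false := beq_eq_false_iff_ne.mpr (Ne.symm h.1)
    simp [pvModK, hb, ih h.2]

theorem pvModK_modK {V : Type} (d : List (String × V)) (k : String) (f g : V → V) :
    pvModK (pvModK d k f) k g = pvModK d k (fun v => g (f v)) := by
  induction d with
  | nil => rfl
  | cons hd t ih =>
    obtain ⟨k', v⟩ := hd
    by_cases hk : (k' == k) <;> simp [pvModK, hk, ih]

theorem pvModK_id {V : Type} (d : List (String × V)) (k : String) :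
    pvModK d k (fun v => v) = d := by
  induction d with
  | nil => rfl
  | cons hd t ih =>
    obtain ⟨k', v⟩ := hd
    by_cases hk : (k' == k) <;> simp [pvModK, hk, ih]

theorem pvFoldl_modK {V β : Type} (k : String) (g : β → V → V) (l : List β)
    (d : List (String × V)) :
    l.foldl (fun d x => pvModK d k (g x)) d
      = pvModK d k (fun v => l.foldl (fun v x => g x v) v) := by
  induction l generalizing d with
  | nil => simp [pvModK_id]
  | cons x t ih =>
    simp only [List.foldl_cons]
    rw [ih, pvModK_modK]

theorem pvLookup_none {V : Type} (d : List (String × V)) (k : String)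
    (h : k ∉ d.map Prod.fst) : List.lookup k d = none := by
  induction d with
  | nil => rfl
  | cons hd t ih =>
    obtain ⟨k', v⟩ := hd
    simp only [List.map_cons, List.mem_cons, not_or] at h
    have hb : (k == k') = false := beq_eq_false_iff_ne.mpr h.1
    simp [List.lookup, hb, ih h.2]

theorem pvMap_modK {V α : Type} (k : String) (f : V → V) (g h : String × V → α)
    (d : List (String × V)) (hnd : (d.map Prod.fst).Nodup)
    (hne : ∀ p ∈ d, p.1 ≠ k → h p = g p)
    (hk : ∀ v, h (k, f v) = g (k, v)) :
    (pvModK d k f).map h = d.map g := by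
  induction d with
  | nil => rfl
  | cons hd t ih =>
    obtain ⟨k', v⟩ := hd
    simp only [List.map_cons, List.nodup_cons] at hnd
    by_cases hkk : (k' == k)
    · have he : k' = k := by simpa using hkk
      have hred : pvModK ((k', v) :: t) k f = (k', f v) :: t := by simp [pvModK, hkk]
      rw [hred, List.map_cons, List.map_cons, he, hk v]
      congr 1
      have hnot : ∀ p ∈ t, p.1 ≠ k := fun p hp hpe =>
        hnd.1 (by rw [he]; exact hpe ▸ List.mem_map_of_mem hp)
      exact List.map_congr_left (fun p hp => hne p (List.mem_cons_of_mem _ hp) (hnot p hp))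
    · have hk' : k' ≠ k := by simpa using hkk
      have hred : pvModK ((k', v) :: t) k f = (k', v) :: pvModK t k f := by
        simp [pvModK, beq_eq_false_iff_ne.mpr hk']
      rw [hred, List.map_cons, List.map_cons]
      rw [hne (k', v) (List.mem_cons_self) hk',
        ih hnd.2 (fun p hp hpk => hne p (List.mem_cons_of_mem _ hp) hpk)]

-- phase-1 shape: ensure key with a default, then update it in place; over fresh unique keys
theorem pvBuild {V W : Type} (m : W → V → V) (dflt : V) (items : List (String × W))
    (d : List (String × V)) (hnd : (items.map Prod.fst).Nodup)
    (hdisj : ∀ p ∈ items, p.1 ∉ d.map Prod.fst) :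
    items.foldl (fun d p =>
        pvModK (if pvKeyMem d p.1 then d else d ++ [(p.1, dflt)]) p.1 (m p.2)) d
      = d ++ items.map (fun p => (p.1, m p.2 dflt)) := by
  induction items generalizing d with
  | nil => simp
  | cons hd t ih =>
    obtain ⟨k, w⟩ := hd
    simp only [List.map_cons, List.nodup_cons] at hnd
    have hk : k ∉ d.map Prod.fst := hdisj (k, w) List.mem_cons_self
    have hmem : pvKeyMem d k = false := by
      rw [Bool.eq_false_iff]; intro hc; exact hk ((pvKeyMem_iff d k).mp hc)
    simp only [List.foldl_cons, hmem, Bool.false_eq_true, if_false]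
    rw [pvModK_append_fresh d k dflt (m w) hk]
    rw [ih (d ++ [(k, m w dflt)]) hnd.2 ?_]
    · simp
    · intro p hp
      simp only [List.map_append, List.mem_append, List.map_cons]
      rintro (hpd | hpk)
      · exact hdisj p (List.mem_cons_of_mem _ hp) hpd
      · simp only [List.map_nil, List.mem_cons, List.not_mem_nil, or_false] at hpk
        exact hnd.1 (hpk ▸ List.mem_map_of_mem hp)

-- phase-2 shape: wholesale append for new keys, in-place merge for existing ones
theorem pvMerge {V : Type} (m : V → V → V) (items : List (String × V))
    (d : List (String × V)) (hni : (items.map Prod.fst).Nodup)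
    (hnd : (d.map Prod.fst).Nodup) :
    items.foldl (fun d p =>
        if ! pvKeyMem d p.1 then d ++ [(p.1, p.2)]
        else pvModK d p.1 (m p.2)) d
      = d.map (fun e => (e.1, match List.lookup e.1 items with
            | some v => m v e.2
            | none => e.2))
        ++ items.filter (fun p => ! pvKeyMem d p.1) := by
  induction items generalizing d with
  | nil => simp
  | cons hd t ih =>
    obtain ⟨k, w⟩ := hd
    simp only [List.map_cons, List.nodup_cons] at hni
    have hlkt : List.lookup k t = none := pvLookup_none t k hni.1
    by_cases hkm : pvKeyMem d k = true
    · -- key already present: in-place merge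
      simp only [List.foldl_cons, hkm, Bool.not_true, Bool.false_eq_true, if_false]
      rw [ih (pvModK d k (m w)) hni.2 (by rw [pvModK_map_fst]; exact hnd)]
      congr 1
      · exact pvMap_modK k (m w) _ _ d hnd
          (fun p hp hpk => by
            simp only [List.lookup]
            rw [(beq_eq_false_iff_ne.mpr hpk : (p.1 == k) = false)])
          (fun v => by simp [List.lookup, hlkt])
      · rw [List.filter_cons]
        simp only [hkm, Bool.not_true, Bool.false_eq_true, if_false]
        exact List.filter_congr (fun p hp => by
          simp [pvKeyMem, pvModK_map_fst])
    · -- new key: appended wholesale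
      have hk : k ∉ d.map Prod.fst := fun hc => hkm ((pvKeyMem_iff d k).mpr hc)
      have hkm' : pvKeyMem d k = false := by rw [Bool.eq_false_iff]; exact hkm
      simp only [List.foldl_cons, hkm', Bool.not_false, if_true]
      rw [ih (d ++ [(k, w)]) hni.2 (by
        simp only [List.map_append, List.map_cons, List.map_nil]
        exact List.Nodup.append hnd (List.nodup_singleton k) (by
          intro a ha hb; simp only [List.mem_singleton] at hb; exact hk (hb ▸ ha)))]
      rw [List.map_append]
      have hmapeq : d.map (fun e => ((e.1 : String), match List.lookup e.1 t with
            | some v => m v e.2 | none => e.2))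
          = d.map (fun e => (e.1, match List.lookup e.1 ((k, w) :: t) with
            | some v => m v e.2 | none => e.2)) :=
        List.map_congr_left (fun e he => by
          have hek : e.1 ≠ k := fun hc => hk (hc ▸ List.mem_map_of_mem he)
          simp only [List.lookup]
          rw [(beq_eq_false_iff_ne.mpr hek : (e.1 == k) = false)])
      rw [hmapeq]
      have hfil : t.filter (fun p => ! pvKeyMem (d ++ [(k, w)]) p.1)
          = t.filter (fun p => ! pvKeyMem d p.1) :=
        List.filter_congr (fun p hp => by
          have hpk : p.1 ≠ k := fun hc => hni.1 (hc ▸ List.mem_map_of_mem hp)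
          simp [pvKeyMem, hpk])
      rw [hfil, List.filter_cons]
      simp only [hkm', Bool.not_false, if_true]
      simp [List.lookup, hlkt]

theorem pvExtend_fresh (ids l : List Int) :
    pvExtend [[("question_ids", l)]] ids = [[("question_ids", l ++ ids)]] := by
  simp [pvExtend, pvModK]

theorem pvLookup_mem {V : Type} {d : List (String × V)} {k : String} {v : V}
    (h : List.lookup k d = some v) : (k, v) ∈ d := by
  induction d with
  | nil => simp [List.lookup] at h
  | cons hd t ih =>
    obtain ⟨k', v'⟩ := hd
    by_cases hb : (k == k')
    · have he : k = k' := by simpa using hb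
      simp only [List.lookup, hb] at h
      obtain rfl : v' = v := by simpa using h
      exact he ▸ List.mem_cons_self
    · have hbf : (k == k') = false := by simpa using hb
      simp only [List.lookup, hbf, Bool.false_eq_true, if_false] at h
      exact List.mem_cons_of_mem _ (ih h)

-- ===== VERDICT (by name: the statement is the Claim_ definition above) =====
theorem combine_json_spec : Claim_equal_combine_json := by
  intro json1 json2 constant _hdom hpre
  obtain ⟨h1s, h2s, hn2, hn1, hc2, hc1⟩ := hpre
  unfold Spec_combine_json
  set c2 : pvCats := (List.lookup "categories" json2).getD [] with hc2def
  set c1 : pvCats := (List.lookup "categories" json1).getD [] with hc1def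
  have key :
      [("categories",
        c1.foldl (fun co p =>
          if ! pvKeyMem co p.1 then co ++ [(p.1, p.2)]
          else p.2.foldl (fun co q =>
            pvModK co p.1 (fun cd =>
              if ! pvKeyMem cd q.1 then cd ++ [(q.1, q.2)]
              else pvModK cd q.1 (fun ql => pvExtend ql (pvRawIds q.2)))) co)
          (c2.foldl (fun co p =>
            p.2.foldl (fun co q =>
              pvModK co p.1 (fun cd =>
                pvModK (if pvKeyMem cd q.1 then cd else cd ++ [(q.1, [[("question_ids", ([] : List Int))]])])
                  q.1 (fun ql => pvExtend ql ((pvRawIds q.2).map (fun qid => qid + constant)))))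
              (if pvKeyMem co p.1 then co else co ++ [(p.1, ([] : pvSubs))])) []))]
      = [("categories",
          c2.map (fun p => (p.1, pvSubsB ((List.lookup p.1 c1).getD []) p.2 constant))
          ++ c1.filter (fun p => ! pvKeyMem c2 p.1))] := by
    -- phase 1: the json2 pass builds exactly c2 mapped to fresh offset entries
    have hphase1 :
        c2.foldl (fun co p =>
          p.2.foldl (fun co q =>
            pvModK co p.1 (fun cd =>
              pvModK (if pvKeyMem cd q.1 then cd else cd ++ [(q.1, [[("question_ids", ([] : List Int))]])])
                q.1 (fun ql => pvExtend ql ((pvRawIds q.2).map (fun qid => qid + constant)))))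
            (if pvKeyMem co p.1 then co else co ++ [(p.1, ([] : pvSubs))])) []
        = c2.map (fun p => (p.1, p.2.map (fun q =>
            (q.1, [[("question_ids", (pvRawIds q.2).map (fun qid => qid + constant))]])))) := by
      have hsteps : ∀ (co : pvCats) (p : String × pvSubs), p ∈ c2 →
          p.2.foldl (fun co q =>
            pvModK co p.1 (fun cd =>
              pvModK (if pvKeyMem cd q.1 then cd else cd ++ [(q.1, [[("question_ids", ([] : List Int))]])])
                q.1 (fun ql => pvExtend ql ((pvRawIds q.2).map (fun qid => qid + constant)))))
            (if pvKeyMem co p.1 then co else co ++ [(p.1, ([] : pvSubs))])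
          = pvModK (if pvKeyMem co p.1 then co else co ++ [(p.1, ([] : pvSubs))]) p.1
              (fun cd => p.2.foldl (fun cd q =>
                pvModK (if pvKeyMem cd q.1 then cd else cd ++ [(q.1, [[("question_ids", ([] : List Int))]])])
                  q.1 (fun ql => pvExtend ql ((pvRawIds q.2).map (fun qid => qid + constant)))) cd) := by
        intro co p _
        exact pvFoldl_modK p.1 _ p.2 _
      rw [List.foldl_ext _ _ _ hsteps]
      rw [pvBuild (fun subs cd => subs.foldl (fun cd q =>
          pvModK (if pvKeyMem cd q.1 then cd else cd ++ [(q.1, [[("question_ids", ([] : List Int))]])])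
            q.1 (fun ql => pvExtend ql ((pvRawIds q.2).map (fun qid => qid + constant)))) cd)
        ([] : pvSubs) c2 [] hn2 (by simp)]
      rw [List.nil_append]
      refine List.map_congr_left (fun p hp => ?_)
      congr 1
      rw [pvBuild (fun qs ql => pvExtend ql ((pvRawIds qs).map (fun qid => qid + constant)))
        ([[("question_ids", ([] : List Int))]]) p.2 [] (hc2 p hp).1 (by simp)]
      rw [List.nil_append]
      exact List.map_congr_left (fun q _ => by rw [pvExtend_fresh]; simp)
    rw [hphase1]
    -- phase 2: the json1 pass merges into the built dict / appends json1-only categories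
    have hstep2 : ∀ (co : pvCats) (p : String × pvSubs), p ∈ c1 →
        (if ! pvKeyMem co p.1 then co ++ [(p.1, p.2)]
         else p.2.foldl (fun co q =>
           pvModK co p.1 (fun cd =>
             if ! pvKeyMem cd q.1 then cd ++ [(q.1, q.2)]
             else pvModK cd q.1 (fun ql => pvExtend ql (pvRawIds q.2)))) co)
        = (if ! pvKeyMem co p.1 then co ++ [(p.1, p.2)]
           else pvModK co p.1 (fun cd => p.2.foldl (fun cd q =>
             if ! pvKeyMem cd q.1 then cd ++ [(q.1, q.2)]
             else pvModK cd q.1 (fun ql => pvExtend ql (pvRawIds q.2))) cd)) := by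
      intro co p _
      cases hb : pvKeyMem co p.1 with
      | false => simp only [hb, Bool.not_false, if_true]
      | true =>
        simp only [hb, Bool.not_true, Bool.false_eq_true, if_false]
        exact pvFoldl_modK p.1 _ p.2 _
    rw [List.foldl_ext _ _ _ hstep2]
    have hkeys : (c2.map (fun p => (p.1, p.2.map (fun q =>
        (q.1, [[("question_ids", (pvRawIds q.2).map (fun qid => qid + constant))]]))))).map Prod.fst
        = c2.map Prod.fst := by
      simp
    rw [pvMerge (fun subs cd => subs.foldl (fun cd q =>
        if ! pvKeyMem cd q.1 then cd ++ [(q.1, q.2)]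
        else pvModK cd q.1 (fun ql => pvExtend ql (pvRawIds q.2))) cd) c1 _ hn1 (by rw [hkeys]; exact hn2)]
    congr 2
    congr 1
    · -- merged part: entrywise equal to B's single pass over c2
      rw [List.map_map]
      refine List.map_congr_left (fun p hp => ?_)
      show (p.1, _) = (p.1, pvSubsB ((List.lookup p.1 c1).getD []) p.2 constant)
      cases hl : List.lookup p.1 c1 with
      | none =>
        simp [pvSubsB, pvMergeIds]
      | some subs =>
        simp only [hl]
        obtain ⟨hns, -⟩ := hc1 (p.1, subs) (pvLookup_mem hl) p hp rfl
        congr 1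
        rw [pvMerge (fun qs ql => pvExtend ql (pvRawIds qs)) subs
          (p.2.map (fun q => (q.1, [[("question_ids", (pvRawIds q.2).map (fun qid => qid + constant))]])))
          hns (by simpa using (hc2 p hp).1)]
        show _ = pvSubsB subs p.2 constant
        unfold pvSubsB
        congr 1
        · rw [List.map_map]
          refine List.map_congr_left (fun q _ => ?_)
          cases hlq : List.lookup q.1 subs with
          | none => simp [hlq, pvMergeIds]
          | some qs1 => simp [hlq, pvMergeIds, pvExtend_fresh]
        · exact List.filter_congr (fun q _ => by simp [pvKeyMem])
    · -- json1-only categories, appended wholesale in c1 order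
      exact List.filter_congr (fun p _ => by simp [pvKeyMem])
  exact key
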